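-- pv_equiv track=rewrite | github.com/IronDad-Tony/Oanda_Trading_Bot | scripts/live_test_bypass_ui.py | select_five_fx_symbols
-- ===== SOURCE A (Python) =====
-- from typing import List, Dict, Any, Optional
--
-- def select_five_fx_symbols(valid: List[str]) -> List[str]:
--     # Prefer common FX majors available in most OANDA accounts
--     preferred = ["EUR_USD", "USD_JPY", "GBP_USD", "AUD_USD", "AUD_JPY", "USD_CAD", "USD_CHF", "NZD_USD"]
--     sel = [s for s in preferred if s in valid]
--     if len(sel) >= 5:
--         return sel[:5]
--     # Fall back to any FX pairs among valid list (exclude indices/metals/CFDs heuristically)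
--     fx = [s for s in valid if s.count('_') == 1 and s.endswith(("USD", "JPY", "EUR", "GBP", "AUD", "CAD", "CHF", "NZD"))]
--     for s in fx:
--         if s not in sel:
--             sel.append(s)
--             if len(sel) == 5:
--                 break
--     return sel[:5]
-- ===== SOURCE B (Python) =====
-- def select_five_fx_symbols(valid):
--     # Rank-and-sort: assign each distinct candidate symbol a numeric rank
--     # (preferred majors rank by their index, other FX pairs rank after them by
--     # first position in valid), then sort by rank and take the first five.
--     preferred = ["EUR_USD", "USD_JPY", "GBP_USD", "AUD_USD", "AUD_JPY", "USD_CAD", "USD_CHF", "NZD_USD"]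
--     suffixes = ("USD", "JPY", "EUR", "GBP", "AUD", "CAD", "CHF", "NZD")
--     ranked = []
--     seen = set()
--     for i, s in enumerate(valid):
--         if s in seen:
--             continue
--         seen.add(s)
--         if s in preferred:
--             ranked.append((preferred.index(s), s))
--         elif s.count('_') == 1 and s.endswith(suffixes):
--             ranked.append((len(preferred) + i, s))
--     ranked.sort(key=lambda t: t[0])
--     return [s for _, s in ranked[:5]]
-- ===== Notes on version B (the rewrite author's own statement) =====
-- stated objective: alternative
-- what changed: Replaces A's two-phase construction (preferred filter, early return at 5, then an append-with-break dedup loop) by a rank-and-sort algorithm: one pass over valid assigns each distinct candidate a numeric rank (preferred index, or 8 + first position for fallback FX pairs), then sort by rank and take the first five.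
import Mathlib
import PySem

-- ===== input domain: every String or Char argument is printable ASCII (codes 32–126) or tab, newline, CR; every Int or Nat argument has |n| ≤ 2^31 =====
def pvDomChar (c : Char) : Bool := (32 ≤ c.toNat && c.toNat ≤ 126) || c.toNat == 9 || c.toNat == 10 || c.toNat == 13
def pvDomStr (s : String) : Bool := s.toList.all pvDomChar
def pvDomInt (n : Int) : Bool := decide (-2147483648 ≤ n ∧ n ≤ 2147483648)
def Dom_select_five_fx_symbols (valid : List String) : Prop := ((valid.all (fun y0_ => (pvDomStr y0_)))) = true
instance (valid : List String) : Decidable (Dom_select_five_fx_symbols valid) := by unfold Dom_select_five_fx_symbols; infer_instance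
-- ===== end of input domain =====

-- B replaces A's two-phase early-return/append-break construction by a rank-and-sort algorithm:
-- one pass assigns each distinct candidate a numeric rank, then a stable sort by rank and take 5.
-- Objective: alternative (same return value on all inputs).

-- shared literal constants of both programs
def pvPreferred : List String :=
  ["EUR_USD", "USD_JPY", "GBP_USD", "AUD_USD", "AUD_JPY", "USD_CAD", "USD_CHF", "NZD_USD"]

-- s.count('_') == 1 and s.endswith(("USD","JPY","EUR","GBP","AUD","CAD","CHF","NZD"))
def pvIsFx (s : String) : Bool :=
  PySem.Str.count s "_" == 1 &&
  (PySem.Str.endswith s "USD" || PySem.Str.endswith s "JPY" || PySem.Str.endswith s "EUR" ||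
   PySem.Str.endswith s "GBP" || PySem.Str.endswith s "AUD" || PySem.Str.endswith s "CAD" ||
   PySem.Str.endswith s "CHF" || PySem.Str.endswith s "NZD")

-- ===== PORT A =====
-- the 'for s in fx: if s not in sel: sel.append(s); if len(sel)==5: break' loop
def pvLoopA : List String → List String → List String
  | [], sel => sel
  | s :: rest, sel =>
    if s ∈ sel then pvLoopA rest sel
    else
      let sel' := sel ++ [s]
      if sel'.length = 5 then sel' else pvLoopA rest sel'

def select_five_fx_symbols (valid : List String) : List String :=
  let sel := pvPreferred.filter (fun s => valid.contains s)
  if 5 ≤ sel.length then sel.take 5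
  else
    let fx := valid.filter pvIsFx
    (pvLoopA fx sel).take 5

-- ===== PORT B =====
-- preferred.index(s); only evaluated under the guard 's in preferred', where index? is some
def pvIdx (s : String) : Int := ((PySem.List.index? pvPreferred s).getD 0 : Nat)

-- the 'for i, s in enumerate(valid): …' loop building (rank, symbol) pairs with a seen set
def pvLoopB : List (Int × String) → List (Int × String) → PySem.Set String → List (Int × String)
  | [], ranked, _ => ranked
  | (i, s) :: rest, ranked, seen =>
    if seen.contains s then pvLoopB rest ranked seen
    else
      let seen' := seen.add s
      if pvPreferred.contains s then pvLoopB rest (ranked ++ [(pvIdx s, s)]) seen'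
      else if pvIsFx s then pvLoopB rest (ranked ++ [(8 + i, s)]) seen'  -- len(preferred) = 8
      else pvLoopB rest ranked seen'

def select_five_fx_symbols_alt (valid : List String) : List String :=
  let ranked := pvLoopB (PySem.List.enumerate valid) [] (PySem.Set.ofList [])
  let sortedR := PySem.List.sorted ranked (fun t => t.1)  -- ranked.sort(key=lambda t: t[0])
  (sortedR.take 5).map (fun t => t.2)

-- ===== PRECONDITION & SPEC =====
def Spec_select_five_fx_symbols (valid : List String) (out : List String) : Prop := out = select_five_fx_symbols_alt valid
instance (valid : List String) (out : List String) : Decidable (Spec_select_five_fx_symbols valid out) := by unfold Spec_select_five_fx_symbols; infer_instance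

-- ===== CLAIM (what is proved, stated in full; the proofs are below) =====
def Claim_equal_select_five_fx_symbols : Prop := ∀ (valid : List String), Dom_select_five_fx_symbols valid → Spec_select_five_fx_symbols valid (select_five_fx_symbols valid)

-- ===== LEMMAS AND PROOFS =====

-- list(dict.fromkeys)-style ordered dedup against a growing seen list (proof-side model of A's loop)
def pvDedup : List String → List String → List String
  | [], _ => []
  | x :: xs, seen => if x ∈ seen then pvDedup xs seen else x :: pvDedup xs (x :: seen)

-- proof-side closed form of B's loop (seen as a plain list)
def pvMix : List (Int × String) → List String → List (Int × String)
  | [], _ => []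
  | (i, s) :: rest, seen =>
    if s ∈ seen then pvMix rest seen
    else if s ∈ pvPreferred then (pvIdx s, s) :: pvMix rest (s :: seen)
    else if pvIsFx s = true then (8 + i, s) :: pvMix rest (s :: seen)
    else pvMix rest (s :: seen)

-- the non-preferred part of pvMix
def pvFb : List (Int × String) → List String → List (Int × String)
  | [], _ => []
  | (i, s) :: rest, seen =>
    if s ∈ seen then pvFb rest seen
    else if s ∈ pvPreferred then pvFb rest (s :: seen)
    else if pvIsFx s = true then (8 + i, s) :: pvFb rest (s :: seen)
    else pvFb rest (s :: seen)

-- the preferred part, in preferred order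
def pvPrefPairs (valid : List String) : List (Int × String) :=
  (PySem.List.enumerate pvPreferred).filterMap (fun p => if valid.contains p.2 then some p else none)

theorem enum_pref_eq : PySem.List.enumerate pvPreferred =
    [(0, "EUR_USD"), (1, "USD_JPY"), (2, "GBP_USD"), (3, "AUD_USD"),
     (4, "AUD_JPY"), (5, "USD_CAD"), (6, "USD_CHF"), (7, "NZD_USD")] := by decide

theorem mem_enum_pref (a : Int) (s : String) :
    (a, s) ∈ PySem.List.enumerate pvPreferred ↔ s ∈ pvPreferred ∧ a = pvIdx s := by
  rw [enum_pref_eq]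
  constructor
  · intro h; fin_cases h <;> exact ⟨by decide, by decide⟩
  · rintro ⟨hs, rfl⟩
    fin_cases hs <;> decide

theorem pvLoopB_eq_pvMix (l : List (Int × String)) : ∀ (acc : List (Int × String))
    (seen : PySem.Set String) (seenM : List String), (∀ x, x ∈ seen ↔ x ∈ seenM) →
    pvLoopB l acc seen = acc ++ pvMix l seenM := by
  induction l with
  | nil => intro acc seen seenM _; simp [pvLoopB, pvMix]
  | cons p rest ih =>
    obtain ⟨i, s⟩ := p
    intro acc seen seenM h
    have hc : seen.contains s = true ↔ s ∈ seenM := by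
      simp only [PySem.Set.contains_eq_listContains, List.contains_eq_mem, decide_eq_true_eq]
      exact h s
    simp only [pvLoopB, pvMix]
    by_cases hm : s ∈ seenM
    · rw [if_pos (hc.mpr hm), if_pos hm]; exact ih _ _ _ h
    · rw [if_neg (fun hx => hm (hc.mp hx)), if_neg hm]
      have h' : ∀ x, x ∈ seen.add s ↔ x ∈ s :: seenM := by
        intro x
        rw [PySem.Set.mem_add, List.mem_cons]
        constructor
        · rintro (hx | rfl)
          · exact Or.inr ((h x).mp hx)
          · exact Or.inl rfl
        · rintro (rfl | hx)
          · exact Or.inr rfl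
          · exact Or.inl ((h x).mpr hx)
      have hp : pvPreferred.contains s = true ↔ s ∈ pvPreferred := by
        simp only [List.contains_eq_mem, decide_eq_true_eq]
      by_cases hpref : s ∈ pvPreferred
      · rw [if_pos (hp.mpr hpref), if_pos hpref, ih _ _ _ h']
        simp
      · rw [if_neg (fun hx => hpref (hp.mp hx)), if_neg hpref]
        by_cases hfx : pvIsFx s = true
        · rw [if_pos hfx, if_pos hfx, ih _ _ _ h']
          simp
        · rw [if_neg hfx, if_neg hfx]; exact ih _ _ _ h' 

theorem pvMix_filter_not_pref (l : List (Int × String)) : ∀ (seen : List String),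
    (pvMix l seen).filter (fun p => !(pvPreferred.contains p.2)) = pvFb l seen := by
  induction l with
  | nil => intro seen; rfl
  | cons p rest ih =>
    obtain ⟨i, s⟩ := p
    intro seen
    simp only [pvMix, pvFb]
    by_cases hm : s ∈ seen
    · rw [if_pos hm, if_pos hm]; exact ih _
    · rw [if_neg hm, if_neg hm]
      by_cases hpref : s ∈ pvPreferred
      · rw [if_pos hpref, if_pos hpref, List.filter_cons_of_neg (by simpa using hpref)]
        exact ih _
      · rw [if_neg hpref, if_neg hpref]
        by_cases hfx : pvIsFx s = true
        · rw [if_pos hfx, if_pos hfx, List.filter_cons_of_pos (by simpa using hpref)]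
          rw [ih _]
        · rw [if_neg hfx, if_neg hfx]; exact ih _

theorem pvMix_mem (l : List (Int × String)) : ∀ (seen : List String) (p : Int × String),
    p ∈ pvMix l seen → p.2 ∈ l.map Prod.snd ∧ p.2 ∉ seen ∧ (p.2 ∈ pvPreferred → p.1 = pvIdx p.2) := by
  induction l with
  | nil => intro seen p h; simp [pvMix] at h
  | cons q rest ih =>
    obtain ⟨i, s⟩ := q
    intro seen p h
    simp only [pvMix] at h
    by_cases hm : s ∈ seen
    · rw [if_pos hm] at h
      obtain ⟨h1, h2, h3⟩ := ih _ _ h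
      exact ⟨by simp [h1], h2, h3⟩
    · rw [if_neg hm] at h
      by_cases hpref : s ∈ pvPreferred
      · rw [if_pos hpref] at h
        rcases List.mem_cons.mp h with rfl | h'
        · exact ⟨by simp, hm, fun _ => rfl⟩
        · obtain ⟨h1, h2, h3⟩ := ih _ _ h'
          refine ⟨by simp [h1], fun hx => h2 (List.mem_cons_of_mem _ hx), h3⟩
      · rw [if_neg hpref] at h
        by_cases hfx : pvIsFx s = true
        · rw [if_pos hfx] at h
          rcases List.mem_cons.mp h with rfl | h'
          · exact ⟨by simp, hm, fun hx => absurd hx hpref⟩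
          · obtain ⟨h1, h2, h3⟩ := ih _ _ h'
            refine ⟨by simp [h1], fun hx => h2 (List.mem_cons_of_mem _ hx), h3⟩
        · rw [if_neg hfx] at h
          obtain ⟨h1, h2, h3⟩ := ih _ _ h
          refine ⟨by simp [h1], fun hx => h2 (List.mem_cons_of_mem _ hx), h3⟩

theorem pvMix_mem_pref (l : List (Int × String)) : ∀ (seen : List String) (s : String),
    s ∈ pvPreferred → s ∈ l.map Prod.snd → s ∉ seen → (pvIdx s, s) ∈ pvMix l seen := by
  induction l with
  | nil => intro seen s _ h _; simp at h
  | cons q rest ih =>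
    obtain ⟨i, t⟩ := q
    intro seen s hpref hmem hseen
    simp only [pvMix]
    by_cases hm : t ∈ seen
    · rw [if_pos hm]
      have hst : s ≠ t := fun he => hseen (he ▸ hm)
      have : s ∈ rest.map Prod.snd := by
        rcases List.mem_cons.mp (by simpa only [List.map_cons] using hmem) with he | h'
        · exact absurd he hst
        · exact h'
      exact ih _ _ hpref this hseen
    · rw [if_neg hm]
      by_cases hts : s = t
      · subst hts
        rw [if_pos hpref]
        exact List.mem_cons_self
      · have hrest : s ∈ rest.map Prod.snd := by
          rcases List.mem_cons.mp (by simpa only [List.map_cons] using hmem) with he | h'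
          · exact absurd he hts
          · exact h' 
        have hseen' : s ∉ t :: seen := by
          simp only [List.mem_cons, not_or]; exact ⟨hts, hseen⟩
        by_cases htp : t ∈ pvPreferred
        · rw [if_pos htp]
          exact List.mem_cons_of_mem _ (ih _ _ hpref hrest hseen')
        · rw [if_neg htp]
          by_cases hfx : pvIsFx t = true
          · rw [if_pos hfx]
            exact List.mem_cons_of_mem _ (ih _ _ hpref hrest hseen')
          · rw [if_neg hfx]
            exact ih _ _ hpref hrest hseen' 

theorem pvMix_snd_nodup (l : List (Int × String)) : ∀ (seen : List String),
    ((pvMix l seen).map Prod.snd).Nodup ∧ ∀ s ∈ (pvMix l seen).map Prod.snd, s ∉ seen := by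
  induction l with
  | nil => intro seen; simp [pvMix]
  | cons q rest ih =>
    obtain ⟨i, s⟩ := q
    intro seen
    simp only [pvMix]
    by_cases hm : s ∈ seen
    · rw [if_pos hm]; exact ih _
    · rw [if_neg hm]
      have key : ∀ (j : Int), (((j, s) :: pvMix rest (s :: seen)).map Prod.snd).Nodup ∧
          ∀ t ∈ (((j, s) :: pvMix rest (s :: seen)).map Prod.snd), t ∉ seen := by
        intro j
        obtain ⟨hnd, hnin⟩ := ih (s :: seen)
        constructor
        · simp only [List.map_cons, List.nodup_cons]
          exact ⟨fun hx => (hnin _ hx) List.mem_cons_self, hnd⟩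
        · intro t ht
          rcases List.mem_cons.mp ht with rfl | ht'
          · exact hm
          · exact fun hx => (hnin _ ht') (List.mem_cons_of_mem _ hx)
      by_cases hpref : s ∈ pvPreferred
      · rw [if_pos hpref]; exact key _
      · rw [if_neg hpref]
        by_cases hfx : pvIsFx s = true
        · rw [if_pos hfx]; exact key _
        · rw [if_neg hfx]
          obtain ⟨hnd, hnin⟩ := ih (s :: seen)
          exact ⟨hnd, fun t ht hx => (hnin _ ht) (List.mem_cons_of_mem _ hx)⟩

theorem pvFb_sublist (l : List (Int × String)) : ∀ (seen : List String),
    (pvFb l seen).Sublist (l.map (fun q => ((8 : Int) + q.1, q.2))) := by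
  induction l with
  | nil => intro seen; simp [pvFb]
  | cons q rest ih =>
    obtain ⟨i, s⟩ := q
    intro seen
    simp only [pvFb, List.map_cons]
    by_cases hm : s ∈ seen
    · rw [if_pos hm]; exact (ih seen).cons _
    · rw [if_neg hm]
      by_cases hpref : s ∈ pvPreferred
      · rw [if_pos hpref]; exact (ih _).cons _
      · rw [if_neg hpref]
        by_cases hfx : pvIsFx s = true
        · rw [if_pos hfx]; exact (ih _).cons₂ _
        · rw [if_neg hfx]; exact (ih _).cons _

-- map snd of pvFb is A's fallback dedup, under a membership correspondence of the seen sets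
theorem pvFb_snd (l : List (Int × String)) : ∀ (seenF seenD : List String),
    (∀ p ∈ l, pvIsFx p.2 = true → (p.2 ∈ seenD ↔ p.2 ∈ pvPreferred ∨ p.2 ∈ seenF)) →
    (pvFb l seenF).map Prod.snd = pvDedup ((l.map Prod.snd).filter pvIsFx) seenD := by
  induction l with
  | nil => intro seenF seenD _; rfl
  | cons q rest ih =>
    obtain ⟨i, s⟩ := q
    intro seenF seenD h
    have hrest : ∀ p ∈ rest, pvIsFx p.2 = true → (p.2 ∈ seenD ↔ p.2 ∈ pvPreferred ∨ p.2 ∈ seenF) :=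
      fun p hp => h p (List.mem_cons_of_mem _ hp)
    simp only [pvFb, List.map_cons]
    by_cases hfx : pvIsFx s = true
    · have hs := h (i, s) List.mem_cons_self hfx
      rw [List.filter_cons_of_pos hfx]
      simp only [pvDedup]
      by_cases hm : s ∈ seenF
      · rw [if_pos hm, if_pos (hs.mpr (Or.inr hm))]
        exact ih _ _ hrest
      · rw [if_neg hm]
        by_cases hpref : s ∈ pvPreferred
        · rw [if_pos hpref, if_pos (hs.mpr (Or.inl hpref))]
          refine ih _ _ ?_
          intro p hp hpfx
          rw [hrest p hp hpfx, List.mem_cons]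
          constructor
          · tauto
          · rintro (h1 | h2 | h3)
            · exact Or.inl h1
            · rw [h2]; exact Or.inl hpref
            · exact Or.inr h3
        · rw [if_neg hpref, if_pos hfx,
            if_neg (fun hx => (not_or.mpr ⟨hpref, hm⟩) (hs.mp hx))]
          simp only [List.map_cons]
          refine congrArg (s :: ·) (ih _ _ ?_)
          intro p hp hpfx
          simp only [List.mem_cons, hrest p hp hpfx]
          tauto
    · rw [List.filter_cons_of_neg hfx]
      by_cases hm : s ∈ seenF
      · rw [if_pos hm]; exact ih _ _ hrest
      · rw [if_neg hm]
        by_cases hpref : s ∈ pvPreferred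
        · rw [if_pos hpref]
          refine ih _ _ ?_
          intro p hp hpfx
          rw [hrest p hp hpfx, List.mem_cons]
          constructor
          · tauto
          · rintro (h1 | h2 | h3)
            · exact Or.inl h1
            · rw [h2]; exact Or.inl hpref
            · exact Or.inr h3
        · rw [if_neg hpref, if_neg hfx]
          refine ih _ _ ?_
          intro p hp hpfx
          rw [hrest p hp hpfx, List.mem_cons]
          constructor
          · tauto
          · rintro (h1 | h2 | h3)
            · exact Or.inl h1
            · exact absurd (h2 ▸ hpfx) hfx
            · exact Or.inr h3

theorem enum_props (l : List String) : ∀ (k : Int),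
    ((PySem.List.enumerate l k).map Prod.snd = l) ∧
    (∀ p ∈ PySem.List.enumerate l k, k ≤ p.1) ∧
    (PySem.List.enumerate l k).Pairwise (fun a b => a.1 < b.1) := by
  induction l with
  | nil => intro k; refine ⟨rfl, ?_, List.Pairwise.nil⟩; intro p hp; simp [PySem.List.enumerate] at hp
  | cons x xs ih =>
    intro k
    obtain ⟨h1, h2, h3⟩ := ih (k + 1)
    have he : PySem.List.enumerate (x :: xs) k = (k, x) :: PySem.List.enumerate xs (k + 1) := by
      simp [PySem.List.enumerate]
    refine ⟨?_, ?_, ?_⟩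
    · rw [he]; simp [h1]
    · intro p hp
      rw [he] at hp
      rcases List.mem_cons.mp hp with rfl | hp'
      · exact le_refl _
      · exact le_trans (by omega) (h2 p hp')
    · rw [he]
      exact List.Pairwise.cons (fun p hp => by have := h2 p hp; omega) h3

theorem pvPrefPairs_snd (valid : List String) :
    (pvPrefPairs valid).map Prod.snd = pvPreferred.filter (fun s => valid.contains s) := by
  have gen : ∀ (l : List String) (k : Int),
      ((PySem.List.enumerate l k).filterMap
        (fun p => if valid.contains p.2 then some p else none)).map Prod.snd
      = l.filter (fun s => valid.contains s) := by
    intro l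
    induction l with
    | nil => intro k; rfl
    | cons x xs ih =>
      intro k
      have he : PySem.List.enumerate (x :: xs) k = (k, x) :: PySem.List.enumerate xs (k + 1) := by
        simp [PySem.List.enumerate]
      rw [he, List.filterMap_cons]
      by_cases hc : valid.contains x
      · simp only [hc, if_pos, List.filter_cons_of_pos hc, List.map_cons, ih]
      · simp only [List.filter_cons_of_neg hc]
        rw [if_neg (by simpa using hc)]
        exact ih _
  exact gen pvPreferred 0

theorem pvPrefPairs_mem (valid : List String) (p : Int × String) :
    p ∈ pvPrefPairs valid ↔ p.2 ∈ pvPreferred ∧ p.1 = pvIdx p.2 ∧ valid.contains p.2 := by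
  obtain ⟨a, s⟩ := p
  simp only [pvPrefPairs, List.mem_filterMap]
  constructor
  · rintro ⟨q, hq, hsome⟩
    by_cases hc : valid.contains q.2
    · rw [if_pos hc] at hsome
      obtain rfl := Option.some.inj hsome
      obtain ⟨hp1, hp2⟩ := (mem_enum_pref a s).mp hq
      exact ⟨hp1, hp2, hc⟩
    · rw [if_neg hc] at hsome; exact absurd hsome (by simp)
  · rintro ⟨h1, h2, h3⟩
    exact ⟨(a, s), (mem_enum_pref a s).mpr ⟨h1, h2⟩, by rw [if_pos h3]⟩

theorem pvPrefPairs_pairwise (valid : List String) :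
    (pvPrefPairs valid).Pairwise (fun a b => a.1 < b.1) := by
  have hbase : (PySem.List.enumerate pvPreferred).Pairwise (fun a b => a.1 < b.1) := by
    rw [enum_pref_eq]; decide
  refine List.pairwise_filterMap.mpr (hbase.imp ?_ )
  intro a b hab x hx y hy
  by_cases hca : valid.contains a.2
  · rw [if_pos hca] at hx
    by_cases hcb : valid.contains b.2
    · rw [if_pos hcb] at hy
      obtain rfl := Option.some.inj hx
      obtain rfl := Option.some.inj hy
      exact hab
    · rw [if_neg hcb] at hy; exact absurd hy (by simp)
  · rw [if_neg hca] at hx; exact absurd hx (by simp)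

theorem pvPrefPairs_lt8 (valid : List String) (p : Int × String) (h : p ∈ pvPrefPairs valid) :
    p.1 < 8 := by
  obtain ⟨a, s⟩ := p
  obtain ⟨h1, h2, _⟩ := (pvPrefPairs_mem valid (a, s)).mp h
  simp only at h1 h2 ⊢
  have : pvIdx s < 8 := by fin_cases h1 <;> decide
  omega

-- A-side: the break loop under take 5 is dedup-then-take
theorem pvDedup_congr (l : List String) : ∀ (s1 s2 : List String),
    (∀ x, x ∈ s1 ↔ x ∈ s2) → pvDedup l s1 = pvDedup l s2 := by
  induction l with
  | nil => intro s1 s2 _; rfl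
  | cons x xs ih =>
    intro s1 s2 h
    simp only [pvDedup]
    by_cases hx : x ∈ s1
    · rw [if_pos hx, if_pos ((h x).mp hx)]; exact ih _ _ h
    · rw [if_neg hx, if_neg (fun hc => hx ((h x).mpr hc))]
      refine congrArg (x :: ·) (ih _ _ ?_)
      intro y; simp [h y]

theorem pvLoopA_take (l : List String) : ∀ (sel : List String), sel.length < 5 →
    (pvLoopA l sel).take 5 = (sel ++ pvDedup l sel).take 5 := by
  induction l with
  | nil => intro sel _; simp [pvLoopA, pvDedup]
  | cons s rest ih =>
    intro sel hlen
    simp only [pvLoopA, pvDedup]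
    by_cases hs : s ∈ sel
    · rw [if_pos hs, if_pos hs]; exact ih sel hlen
    · rw [if_neg hs, if_neg hs]
      have hd : pvDedup rest (sel ++ [s]) = pvDedup rest (s :: sel) := by
        refine pvDedup_congr _ _ _ ?_
        intro y; simp; tauto
      by_cases h5 : (sel ++ [s]).length = 5
      · rw [if_pos h5]
        have hre : sel ++ s :: pvDedup rest (s :: sel)
            = (sel ++ [s]) ++ pvDedup rest (s :: sel) := by simp
        rw [hre, List.take_append_of_le_length (le_of_eq h5.symm)]
      · rw [if_neg h5]
        have hlt : (sel ++ [s]).length < 5 := by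
          simp only [List.length_append, List.length_cons, List.length_nil] at *
          omega
        rw [ih _ hlt, hd]
        simp

-- A's result in closed form
theorem pvA_closed (valid : List String) :
    select_five_fx_symbols valid
      = (pvPreferred.filter (fun s => valid.contains s)
          ++ pvDedup (valid.filter pvIsFx) (pvPreferred.filter (fun s => valid.contains s))).take 5 := by
  unfold select_five_fx_symbols
  by_cases h5 : 5 ≤ (pvPreferred.filter (fun s => valid.contains s)).length
  · rw [if_pos h5, List.take_append_of_le_length h5]
  · rw [if_neg h5]
    exact pvLoopA_take _ _ (by omega)

-- B's result in closed form
theorem pvB_closed (valid : List String) :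
    select_five_fx_symbols_alt valid
      = (pvPreferred.filter (fun s => valid.contains s)
          ++ pvDedup (valid.filter pvIsFx) (pvPreferred.filter (fun s => valid.contains s))).take 5 := by
  unfold select_five_fx_symbols_alt
  have hE := enum_props valid 0
  obtain ⟨hsnd, hge, hpw⟩ := hE
  have hmix : pvLoopB (PySem.List.enumerate valid) [] (PySem.Set.ofList [])
      = pvMix (PySem.List.enumerate valid) [] := by
    rw [pvLoopB_eq_pvMix _ [] _ [] (by intro x; simp [PySem.Set.ofList])]
    simp
  -- the sorted ranked list is the preferred block followed by the fallback block
  have hsorted : PySem.List.sorted (pvMix (PySem.List.enumerate valid) []) (fun t => t.1)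
      = pvPrefPairs valid ++ pvFb (PySem.List.enumerate valid) [] := by
    apply PySem.List.sorted_eq_of_perm_of_pairwise_lt
    · -- permutation
      have hfb : (pvMix (PySem.List.enumerate valid) []).filter
          (fun p => !(pvPreferred.contains p.2)) = pvFb (PySem.List.enumerate valid) [] :=
        pvMix_filter_not_pref _ _
      have hnodupMix : (pvMix (PySem.List.enumerate valid) []).Nodup :=
        ((pvMix_snd_nodup (PySem.List.enumerate valid) []).1).of_map Prod.snd
      have hprefperm : (pvPrefPairs valid).Perm
          ((pvMix (PySem.List.enumerate valid) []).filter (fun p => pvPreferred.contains p.2)) := by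
        rw [List.perm_ext_iff_of_nodup]
        · intro p
          obtain ⟨a, t⟩ := p
          rw [pvPrefPairs_mem, List.mem_filter]
          constructor
          · rintro ⟨h1, h2, h3⟩
            refine ⟨?_, by simpa using h1⟩
            have hv : t ∈ (PySem.List.enumerate valid).map Prod.snd := by
              rw [hsnd]; simpa using h3
            have h2' : a = pvIdx t := h2
            subst h2'
            exact pvMix_mem_pref (PySem.List.enumerate valid) [] t h1 hv (by simp)
          · rintro ⟨hmem, hcond⟩
            obtain ⟨hm1, _, hm3⟩ := pvMix_mem _ _ _ hmem
            have h1 : t ∈ pvPreferred := by simpa using hcond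
            refine ⟨h1, hm3 h1, ?_⟩
            rw [hsnd] at hm1
            simpa using hm1
        · exact (pvPrefPairs_pairwise valid).imp
            (fun hab he => by rw [he] at hab; exact lt_irrefl _ hab)
        · exact hnodupMix.filter _
      exact (List.Perm.append hprefperm
        (by rw [hfb] : (pvFb (PySem.List.enumerate valid) []).Perm
          ((pvMix (PySem.List.enumerate valid) []).filter (fun p => !(pvPreferred.contains p.2)))).symm.symm).trans
        (List.filter_append_perm _ _)
    · -- pairwise strictly increasing ranks
      rw [List.pairwise_append]
      refine ⟨pvPrefPairs_pairwise valid, ?_, ?_⟩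
      · refine ((hpw.map (fun q => ((8 : Int) + q.1, q.2)) ?_)).sublist (pvFb_sublist _ [])
        intro a b hab
        simpa using hab
      · intro a ha b hb
        have ha8 := pvPrefPairs_lt8 valid a ha
        have hbmem := (pvFb_sublist (PySem.List.enumerate valid) []).subset hb
        obtain ⟨q, hq, rfl⟩ := List.mem_map.mp hbmem
        have := hge q hq
        simp only
        omega
  have hFb : (pvFb (PySem.List.enumerate valid) []).map Prod.snd
      = pvDedup (valid.filter pvIsFx) (pvPreferred.filter (fun s => valid.contains s)) := by
    have hinv : ∀ p ∈ PySem.List.enumerate valid, pvIsFx p.2 = true →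
        (p.2 ∈ pvPreferred.filter (fun s => valid.contains s) ↔
          p.2 ∈ pvPreferred ∨ p.2 ∈ ([] : List String)) := by
      intro p hp _
      have hv : p.2 ∈ valid := by
        rw [← hsnd]; exact List.mem_map_of_mem hp
      simp [List.mem_filter, hv]
    have h := pvFb_snd (PySem.List.enumerate valid) []
      (pvPreferred.filter (fun s => valid.contains s)) hinv
    rw [hsnd] at h
    exact h
  show List.map Prod.snd (List.take 5 (PySem.List.sorted
      (pvLoopB (PySem.List.enumerate valid) [] (PySem.Set.ofList [])) (fun t => t.1)))
    = _
  rw [hmix, hsorted, List.map_take, List.map_append, pvPrefPairs_snd, hFb]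

-- ===== VERDICT (by name: the statement is the Claim_ definition above) =====
theorem select_five_fx_symbols_spec : Claim_equal_select_five_fx_symbols := by
  intro valid _
  show select_five_fx_symbols valid = select_five_fx_symbols_alt valid
  rw [pvA_closed, pvB_closed]
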